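-- pv_equiv track=rewrite | github.com/hungkien05/VFC-from-NVD-study | code_parser.py | find_start_line
-- ===== SOURCE A (Python) =====
-- def find_start_line(method_source):
--     lines = method_source.split('\n')
--     line_number = 0
--     declaration_line = 0
--     for line in lines:
--         line_number += 1
--         if '{' in line:
--             declaration_line = line_number
--             if line.strip().index('{') > 0:
--                 break
--             else:
--                 declaration_line -= 1
--                 break
--     return declaration_line
-- ===== SOURCE B (Python) =====
-- def find_start_line(method_source):
--     # One pass over the raw characters: track the current line number and
--     # whether a non-whitespace character has been seen on the current line.
--     line_number = 1
--     seen = False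
--     for ch in method_source:
--         if ch == '{':
--             return line_number if seen else line_number - 1
--         if ch == '\n':
--             line_number += 1
--             seen = False
--         elif not ch.isspace():
--             seen = True
--     return 0
-- ===== Notes on version B (the rewrite author's own statement) =====
-- stated objective: simpler
-- what changed: Replaces A's split-into-lines loop with per-line strip()/index() by a single character-level scan of the raw string that carries the current line number and a seen-non-whitespace flag.
import Mathlib
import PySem

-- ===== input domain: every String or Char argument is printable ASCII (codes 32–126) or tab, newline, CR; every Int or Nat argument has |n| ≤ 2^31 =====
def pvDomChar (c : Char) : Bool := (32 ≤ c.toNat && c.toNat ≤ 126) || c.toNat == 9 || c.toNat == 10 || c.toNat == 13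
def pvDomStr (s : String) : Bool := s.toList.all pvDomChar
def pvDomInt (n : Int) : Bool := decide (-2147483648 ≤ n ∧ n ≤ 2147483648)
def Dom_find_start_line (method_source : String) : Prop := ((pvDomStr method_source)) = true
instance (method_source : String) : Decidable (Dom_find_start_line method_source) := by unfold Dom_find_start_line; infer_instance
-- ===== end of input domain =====

-- B replaces A's split-into-lines loop (with per-line strip/index) by a single
-- character scan carrying the line number and a seen-non-whitespace flag: simpler, one pass, no line list.

-- ===== PORT A =====
-- for line in lines: line_number += 1; if '{' in line: … break.  The loop body breaks in
-- both branches, so the recursion returns directly when '{' ∈ line.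
-- line.strip().index('{') is ported as PySem.Chars.find: '{' is in the line, so index = find.
def pvLoopA : List (List Char) → Int → Int
  | [], _ => 0
  | line :: rest, line_number =>
    let ln := line_number + 1
    if PySem.Chars.isIn ['{'] line then
      let dl := ln
      if PySem.Chars.find (PySem.Chars.strip line) ['{'] > 0 then dl else dl - 1
    else pvLoopA rest ln

def find_start_line (method_source : String) : Int :=
  pvLoopA (PySem.Chars.splitOn method_source.toList ['\n']) 0

-- ===== PORT B =====
def pvScanB : List Char → Int → Bool → Int
  | [], _, _ => 0
  | c :: rest, line_number, seen =>
    if c = '{' then (if seen then line_number else line_number - 1)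
    else if c = '\n' then pvScanB rest (line_number + 1) false
    else if PySem.Chars.isspace c then pvScanB rest line_number seen
    else pvScanB rest line_number true

def find_start_line_alt (method_source : String) : Int :=
  pvScanB method_source.toList 1 false

-- ===== PRECONDITION & SPEC =====
def Spec_find_start_line (method_source : String) (out : Int) : Prop := out = find_start_line_alt method_source
instance (method_source : String) (out : Int) : Decidable (Spec_find_start_line method_source out) := by unfold Spec_find_start_line; infer_instance

-- ===== CLAIM (what is proved, stated in full; the proofs are below) =====
def Claim_equal_find_start_line : Prop := ∀ (method_source : String), Dom_find_start_line method_source → Spec_find_start_line method_source (find_start_line method_source)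

-- ===== LEMMAS AND PROOFS =====

-- Reference list-of-lines splitter for sep '\n' (what splitOn computes for a one-char sep).
def pvSplitNl (pre : List Char) : List Char → List (List Char)
  | [] => [pre]
  | c :: rest => if c = '\n' then pre :: pvSplitNl [] rest else pvSplitNl (pre ++ [c]) rest

lemma pvSplitNl_nil (pre : List Char) : pvSplitNl pre [] = [pre] := rfl

lemma pvSplitNl_cons_nl (pre r : List Char) : pvSplitNl pre ('\n' :: r) = pre :: pvSplitNl [] r := by
  simp [pvSplitNl]

lemma pvSplitNl_cons (pre : List Char) (c : Char) (r : List Char) (h : c ≠ '\n') :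
    pvSplitNl pre (c :: r) = pvSplitNl (pre ++ [c]) r := by
  simp [pvSplitNl, h]

lemma pvSplitOn_go_step (f : Nat) (c : Char) (rest cur : List Char) (acc : List (List Char)) :
    PySem.Chars.splitOn.go ['\n'] (f+1) (c::rest) cur acc =
      if c = '\n' then PySem.Chars.splitOn.go ['\n'] f rest [] (cur.reverse::acc)
      else PySem.Chars.splitOn.go ['\n'] f rest (c::cur) acc := by
  simp only [PySem.Chars.splitOn.go, List.isPrefixOf, Bool.and_true]
  by_cases hc : c = '\n'
  · subst hc; simp
  · simp [hc, Ne.symm hc]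

lemma pvSplitOn_go_eq (l : List Char) : ∀ (fuel : Nat) (cur : List Char) (acc : List (List Char)),
    l.length ≤ fuel →
    PySem.Chars.splitOn.go ['\n'] fuel l cur acc = acc.reverse ++ pvSplitNl cur.reverse l := by
  induction l with
  | nil => intro fuel cur acc _; cases fuel <;> simp [PySem.Chars.splitOn.go, pvSplitNl]
  | cons c rest ih =>
    intro fuel cur acc hle
    cases fuel with
    | zero => simp at hle
    | succ f =>
      rw [pvSplitOn_go_step]
      by_cases hc : c = '\n'
      · subst hc
        rw [if_pos rfl, ih f [] (cur.reverse :: acc) (by simpa using hle), pvSplitNl_cons_nl]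
        simp
      · rw [if_neg hc, ih f (c :: cur) acc (by simpa using hle), pvSplitNl_cons _ _ _ hc]
        simp

lemma pvSplitOn_eq (cs : List Char) :
    PySem.Chars.splitOn cs ['\n'] = pvSplitNl [] cs := by
  unfold PySem.Chars.splitOn
  rw [pvSplitOn_go_eq cs (cs.length + 1) [] [] (by omega)]
  simp

lemma pvIsIn_singleton (l : List Char) : PySem.Chars.isIn ['{'] l = true ↔ '{' ∈ l := by
  rw [PySem.Chars.isIn_iff_infix]
  constructor
  · intro hinf; exact hinf.subset (by simp)
  · intro hm
    obtain ⟨u, v, rfl⟩ := List.append_of_mem hm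
    exact ⟨u, v, by simp⟩

lemma pvIsIn_singleton_false (l : List Char) (h : '{' ∉ l) : PySem.Chars.isIn ['{'] l = false := by
  cases hI : PySem.Chars.isIn ['{'] l
  · rfl
  · exact absurd ((pvIsIn_singleton l).mp hI) h

lemma pvLoopA_cons (line : List Char) (rest : List (List Char)) (n : Int) :
    pvLoopA (line :: rest) n =
      if PySem.Chars.isIn ['{'] line then
        (if PySem.Chars.find (PySem.Chars.strip line) ['{'] > 0 then n + 1 else n + 1 - 1)
      else pvLoopA rest (n + 1) := rfl

-- "a non-whitespace character precedes the first '{'" (B's seen flag at the brace)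
def pvNwb : List Char → Bool
  | [] => false
  | c :: r => if c = '{' then false else if PySem.Chars.isspace c then pvNwb r else true

def pvSeen (pre : List Char) : Bool := pre.any (fun c => !(PySem.Chars.isspace c))

lemma pvNwb_append (pre x : List Char) (h : '{' ∈ pre) : pvNwb (pre ++ x) = pvNwb pre := by
  induction pre with
  | nil => simp at h
  | cons c p ih =>
    by_cases hc : c = '{'
    · subst hc; simp [pvNwb]
    · have hp : '{' ∈ p := by
        rcases List.mem_cons.mp h with h1 | h1
        · exact absurd h1.symm hc
        · exact h1
      simp only [List.cons_append, pvNwb, if_neg hc]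
      split <;> simp [ih hp]

lemma pvNwb_append_brace (pre x : List Char) (h : '{' ∉ pre) :
    pvNwb (pre ++ '{' :: x) = pvSeen pre := by
  induction pre with
  | nil => simp [pvNwb, pvSeen]
  | cons c p ih =>
    have hc : c ≠ '{' := fun hh => h (by simp [hh])
    have hp : '{' ∉ p := fun hh => h (by simp [hh])
    simp only [List.cons_append, pvNwb, if_neg hc, pvSeen, List.any_cons]
    by_cases hs : PySem.Chars.isspace c
    · simp [hs, ih hp, pvSeen]
    · simp [hs]

lemma pvMem_dropWhile (l : List Char) (h : '{' ∈ l) :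
    '{' ∈ l.dropWhile PySem.Chars.isspace := by
  induction l with
  | nil => simp at h
  | cons c r ih =>
    by_cases hs : PySem.Chars.isspace c
    · have hc : c ≠ '{' := fun hh => by subst hh; revert hs; decide
      have hr : '{' ∈ r := by
        rcases List.mem_cons.mp h with h1 | h1
        · exact absurd h1.symm hc
        · exact h1
      simpa [List.dropWhile_cons, hs] using ih hr
    · simpa [List.dropWhile_cons, hs] using h

lemma pvMem_lstrip (l : List Char) (h : '{' ∈ l) : '{' ∈ PySem.Chars.lstrip l := by
  unfold PySem.Chars.lstrip
  exact pvMem_dropWhile l h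

lemma pvMem_rstrip (l : List Char) (h : '{' ∈ l) : '{' ∈ PySem.Chars.rstrip l := by
  unfold PySem.Chars.rstrip
  simpa using pvMem_dropWhile l.reverse (by simpa using h)

lemma pvNwb_iff_lstrip (l : List Char) (h : '{' ∈ l) :
    pvNwb l = true ↔ ¬ ['{'] <+: PySem.Chars.lstrip l := by
  induction l with
  | nil => simp at h
  | cons c r ih =>
    by_cases hc : c = '{'
    · subst hc
      simp [pvNwb, PySem.Chars.lstrip, (by decide : PySem.Chars.isspace '{' = false)]
    · by_cases hs : PySem.Chars.isspace c
      · have hr : '{' ∈ r := by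
          rcases List.mem_cons.mp h with h1 | h1
          · exact absurd h1.symm hc
          · exact h1
        simpa [pvNwb, PySem.Chars.lstrip, hs, hc] using ih hr
      · simp [pvNwb, PySem.Chars.lstrip, hs, hc, List.cons_prefix_cons, Ne.symm hc]

lemma pvRstrip_prefix (l : List Char) : PySem.Chars.rstrip l <+: l := by
  unfold PySem.Chars.rstrip
  have h1 : (l.reverse.dropWhile PySem.Chars.isspace) <:+ l.reverse := List.dropWhile_suffix _
  have h2 := List.reverse_prefix.mpr h1
  simpa using h2

lemma pvPrefix_brace_of_prefix (y x : List Char) (hp : y <+: x) (hne : y ≠ []) :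
    (['{'] <+: y ↔ ['{'] <+: x) := by
  obtain ⟨t, rfl⟩ := hp
  cases y with
  | nil => exact absurd rfl hne
  | cons a y' => simp [List.cons_prefix_cons]

lemma pvFind_singleton_pos (s : List Char) :
    (0 < PySem.Chars.find s ['{']) ↔ ('{' ∈ s ∧ ¬ ['{'] <+: s) := by
  by_cases hm : '{' ∈ s
  · obtain ⟨u, v, huv⟩ := List.append_of_mem hm
    have hinf : ['{'] <:+: s := by rw [huv]; exact ⟨u, v, by simp⟩
    have h0 : 0 ≤ PySem.Chars.find s ['{'] := (PySem.Chars.find_nonneg_iff _ _).mpr hinf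
    obtain ⟨hpref, hmin⟩ := PySem.Chars.find_spec h0
    constructor
    · intro hpos
      refine ⟨hm, ?_⟩
      have := hmin 0 (by omega)
      simpa using this
    · rintro ⟨-, hnp⟩
      rcases lt_or_eq_of_le h0 with hlt | heq
      · exact hlt
      · exact absurd (by simpa [← heq] using hpref) hnp
  · have hninf : ¬ ['{'] <:+: s := fun hinf => hm (hinf.subset (by simp))
    have hneg : ¬ (0 ≤ PySem.Chars.find s ['{']) :=
      fun h0 => hninf ((PySem.Chars.find_nonneg_iff _ _).mp h0)
    constructor
    · intro hpos; exact absurd (le_of_lt hpos) hneg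
    · rintro ⟨hmem, -⟩; exact absurd hmem hm

-- A's per-line test equals B's seen condition
lemma pvCond_eq (l : List Char) (h : '{' ∈ l) :
    (0 < PySem.Chars.find (PySem.Chars.strip l) ['{']) ↔ pvNwb l = true := by
  have h1 : '{' ∈ PySem.Chars.lstrip l := pvMem_lstrip l h
  have h2 : '{' ∈ PySem.Chars.strip l := pvMem_rstrip _ h1
  have hne : PySem.Chars.strip l ≠ [] := List.ne_nil_of_mem h2
  rw [pvFind_singleton_pos]
  have hpref : PySem.Chars.strip l <+: PySem.Chars.lstrip l := pvRstrip_prefix _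
  have hiff := pvPrefix_brace_of_prefix _ _ hpref hne
  rw [pvNwb_iff_lstrip l h]
  constructor
  · rintro ⟨-, hnp⟩ hlp; exact hnp (hiff.mpr hlp)
  · intro hnl; exact ⟨h2, fun hp => hnl (hiff.mp hp)⟩

-- A breaks on the line holding the first '{'; its two-way branch equals the pvNwb test
lemma pvLoopA_break (line : List Char) (rest : List (List Char)) (n : Int) (h : '{' ∈ line) :
    pvLoopA (line :: rest) n = if pvNwb line = true then n + 1 else n := by
  rw [pvLoopA_cons, if_pos ((pvIsIn_singleton line).mpr h)]
  by_cases hb : pvNwb line = true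
  · rw [if_pos (by exact_mod_cast (pvCond_eq line h).mpr hb), if_pos hb]
  · rw [if_neg (fun hp => hb ((pvCond_eq line h).mp (by exact_mod_cast hp))), if_neg hb]
    omega

-- A's answer once the accumulated line already holds a '{'
lemma pvLoopA_brace (cs : List Char) : ∀ (pre : List Char) (n : Int), '{' ∈ pre →
    pvLoopA (pvSplitNl pre cs) n = if pvNwb pre = true then n + 1 else n := by
  induction cs with
  | nil =>
    intro pre n h
    rw [pvSplitNl_nil, pvLoopA_break pre [] n h]
  | cons c r ih =>
    intro pre n h
    by_cases hc : c = '\n'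
    · subst hc
      rw [pvSplitNl_cons_nl, pvLoopA_break pre _ n h]
    · rw [pvSplitNl_cons _ _ _ hc, ih (pre ++ [c]) n (by simp [h]), pvNwb_append pre [c] h]

-- main invariant: A on the rest of the lines = B's scan of the remaining characters
lemma pvMain (cs : List Char) : ∀ (pre : List Char) (n : Int), '{' ∉ pre →
    pvLoopA (pvSplitNl pre cs) n = pvScanB cs (n + 1) (pvSeen pre) := by
  induction cs with
  | nil =>
    intro pre n h
    rw [pvSplitNl_nil, pvLoopA_cons, if_neg (by simp [pvIsIn_singleton_false pre h])]
    simp [pvLoopA, pvScanB]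
  | cons c r ih =>
    intro pre n h
    by_cases hb : c = '{'
    · subst hb
      rw [pvSplitNl_cons _ _ _ (by decide), pvLoopA_brace r (pre ++ ['{']) n (by simp)]
      have hap : pvNwb (pre ++ ['{']) = pvSeen pre := by
        simpa using pvNwb_append_brace pre [] h
      rw [hap]
      simp only [pvScanB]
      by_cases hs : pvSeen pre = true
      · simp [hs]
      · simp only [Bool.not_eq_true] at hs; simp [hs]
    · by_cases hc : c = '\n'
      · subst hc
        rw [pvSplitNl_cons_nl, pvLoopA_cons, if_neg (by simp [pvIsIn_singleton_false pre h]),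
          ih [] (n + 1) (by simp)]
        simp [pvScanB, pvSeen]
      · rw [pvSplitNl_cons _ _ _ hc, ih (pre ++ [c]) n (by simp [h, Ne.symm hb])]
        have hseen : pvSeen (pre ++ [c]) = (pvSeen pre || !(PySem.Chars.isspace c)) := by
          simp [pvSeen]
        simp only [pvScanB, if_neg hb, if_neg hc]
        by_cases hs : PySem.Chars.isspace c
        · simp [hseen, hs]
        · simp [hseen, hs]

-- ===== VERDICT (by name: the statement is the Claim_ definition above) =====
theorem find_start_line_spec : Claim_equal_find_start_line := by
  intro s _
  unfold Spec_find_start_line find_start_line find_start_line_alt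
  rw [pvSplitOn_eq]
  simpa [pvSeen] using pvMain s.toList [] 0 (by simp)
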